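-- pv_equiv track=rewrite | github.com/Horse64/core.horse64.org | tools/translator_syntaxhelpers.py | get_next_statement
-- ===== SOURCE A (Python) =====
-- def is_whitespace_token(s):
--     if len(s) == 0:
--         return False
--     for char in s:
--         if char not in [" ", "\t", "\n", "\r"]:
--             return False
--     return True
--
-- def nextnonblank(t, idx, no=1):
--     while no > 0:
--         idx += 1
--         while (idx < len(t) and
--                 t[idx].strip(" \r\n\t") == ""):
--             idx += 1
--         no -= 1
--     if idx >= len(t):
--         return ""
--     return t[idx]
--
-- def is_h64op_with_righthand(v):
--     if v in {"and", "or", "not", "+", "-", "*", "/",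
--             ">", "<", "->",
--             ".", "!=", "=", "=="}:
--         return True
--     if len(v) == 2 and v[1] == "=":
--         return True
--     return False
--
-- def is_h64op_with_lefthand(v):
--     if v in {"and", "or", "+", "-", "*", "/",
--             ">", "<", "->", ".", "!=", "=", "==",
--             ":"}:
--         return True
--     if len(v) == 2 and v[1] == "=":
--         return True
--     return False
--
-- def get_next_statement(s):
--     if len(s) == 0:
--         return []
--     must_continue_tokens = {
--         "->", "(", "[", ":", "later",
--         ",", "else", "as", "in", "from",
--         "rescue", "finally", "elseif"}
--     last_nonwhitespace_token = ""
--     token_count = 0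
--     bracket_nesting = 0
--     _future_last_token = None
--     i = -1
--     for t in s:
--         if (_future_last_token != None and
--                 _future_last_token.strip(" \t\r\n") != ""):
--             last_nonwhitespace_token = _future_last_token
--         _future_last_token = t
--         i += 1
--         token_count += 1
--         if t in ["(", "[", "{"]:
--             bracket_nesting += 1
--         if t in [")", "]", "}"]:
--             bracket_nesting -= 1
--         if (is_whitespace_token(t) and
--                 nextnonblank(t, i) in
--                 must_continue_tokens):
--             continue
--         if (bracket_nesting == 0 and
--                 t == "}"):
--             nt = nextnonblank(s, i)
--             if (not nt in must_continue_tokens and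
--                     not is_h64op_with_lefthand(nt) and
--                     not nt in {"(", "{", "["}) :
--                 return s[:token_count]
--         if (bracket_nesting == 0 and
--                 last_nonwhitespace_token != "" and
--                 t in {"var", "const", "while",
--                 "do", "for", "type"}):  # "if"/"func" can be inline!
--             # Important: cut off BEFORE the token for this one.
--             return s[:token_count - 1]
--         if (bracket_nesting == 0 and
--                 (t.endswith("\n") or t.endswith("\r")) and
--                 last_nonwhitespace_token != "," and
--                 not is_h64op_with_righthand(last_nonwhitespace_token) and
--                 not last_nonwhitespace_token in {"in", "as"} and
--                 not is_h64op_with_lefthand(nextnonblank(s, i)) and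
--                 not nextnonblank(s, i) in must_continue_tokens
--                 ):
--             is_string_continuation = False
--             if (last_nonwhitespace_token.endswith("\"") or
--                     last_nonwhitespace_token.endswith("'")):
--                 z = token_count
--                 while z < len(s) and s[z].strip(" \t\r\n") == "":
--                     z += 1
--                 if z < len(s) and (
--                         s[z].endswith("\"") or s[z].endswith("'")):
--                     is_string_continuation = True
--             if not is_string_continuation:
--                 return s[:token_count]
--         assert(bracket_nesting >= 0), \
--             "failed to find terminating bracket in: " + str(s)
--     return s
-- ===== SOURCE B (Python) =====
-- def _is_righthand_op(v):
--     if v in {"and", "or", "not", "+", "-", "*", "/",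
--             ">", "<", "->",
--             ".", "!=", "=", "=="}:
--         return True
--     return len(v) == 2 and v[1] == "="
--
-- def _is_lefthand_op(v):
--     if v in {"and", "or", "+", "-", "*", "/",
--             ">", "<", "->", ".", "!=", "=", "==",
--             ":"}:
--         return True
--     return len(v) == 2 and v[1] == "="
--
-- _MUST_CONTINUE = {"->", "(", "[", ":", "later",
--     ",", "else", "as", "in", "from",
--     "rescue", "finally", "elseif"}
--
-- def get_next_statement(s):
--     if len(s) == 0:
--         return []
--     n = len(s)
--     # One reverse pass: nxt[i] = first non-blank token after index i ("" if none).
--     nxt = [""] * n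
--     follow = ""
--     for i in range(n - 1, -1, -1):
--         nxt[i] = follow
--         if s[i].strip(" \t\r\n") != "":
--             follow = s[i]
--     last_nb = ""          # last non-blank token before the current one
--     nesting = 0
--     for i in range(n):
--         t = s[i]
--         if t in ("(", "[", "{"):
--             nesting += 1
--         elif t in (")", "]", "}"):
--             nesting -= 1
--         if nesting == 0:
--             if t == "}":
--                 nt = nxt[i]
--                 if (nt not in _MUST_CONTINUE and
--                         not _is_lefthand_op(nt) and
--                         nt not in ("(", "{", "[")):
--                     return s[:i + 1]
--             if (last_nb != "" and
--                     t in ("var", "const", "while", "do", "for", "type")):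
--                 return s[:i]
--             if ((t.endswith("\n") or t.endswith("\r")) and
--                     last_nb != "," and
--                     not _is_righthand_op(last_nb) and
--                     last_nb not in ("in", "as") and
--                     not _is_lefthand_op(nxt[i]) and
--                     nxt[i] not in _MUST_CONTINUE):
--                 if not ((last_nb.endswith("\"") or last_nb.endswith("'")) and
--                         (nxt[i].endswith("\"") or nxt[i].endswith("'"))):
--                     return s[:i + 1]
--         if t.strip(" \t\r\n") != "":
--             last_nb = t
--     return s
-- ===== Notes on version B (the rewrite author's own statement) =====
-- stated objective: alternative
-- what changed: B precomputes in one reverse pass an array nxt[i] of the next non-blank token after each index, replacing A's repeated forward nextnonblank/z-loop scans with O(1) lookups, drops A's dead whitespace-continue branch (nextnonblank called on a string always yields ""), and maintains the last non-blank token directly instead of via A's delayed _future_last_token bookkeeping.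
-- outside the precondition, e.g. on get_next_statement(['a', '\n', ')']): A returns ['a', '\n'], B returns ['a', '\n']
import Mathlib
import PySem

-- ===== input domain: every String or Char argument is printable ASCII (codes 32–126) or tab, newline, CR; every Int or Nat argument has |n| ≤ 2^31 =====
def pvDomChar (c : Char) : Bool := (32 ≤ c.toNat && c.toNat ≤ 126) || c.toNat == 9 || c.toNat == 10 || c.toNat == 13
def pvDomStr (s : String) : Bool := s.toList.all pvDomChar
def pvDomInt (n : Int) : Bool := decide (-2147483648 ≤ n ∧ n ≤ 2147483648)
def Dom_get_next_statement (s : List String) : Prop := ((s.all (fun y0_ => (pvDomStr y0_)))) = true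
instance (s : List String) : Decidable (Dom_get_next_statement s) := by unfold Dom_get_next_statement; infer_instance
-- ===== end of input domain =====

-- B replaces A's repeated forward scans (nextnonblank, the z-loop) by a next-non-blank
-- array built in one reverse pass, drops A's dead whitespace-continue branch and tracks
-- the last non-blank token directly; equivalence of return values is proved on Pre_.

-- ===== PORT A =====
-- is_whitespace_token(s)
def is_whitespace_token (x : String) : Bool :=
  if PySem.Str.len x = 0 then false
  else x.toList.all (fun c => c ∈ [' ', '\t', '\n', '\r'])

-- inner while of nextnonblank on a LIST: skip tokens with t[idx].strip(" \r\n\t") == ""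
def nnbSkip (t : List String) (idx : Int) : Int :=
  if h : idx < (t.length : Int) ∧
      PySem.Str.stripChars ((PySem.List.pyGet? t idx).getD "") " \r\n\t" == "" then
    nnbSkip t (idx + 1)
  else idx
termination_by ((t.length : Int) - idx).toNat
decreasing_by omega

-- nextnonblank(t, idx, no) on a list of tokens
def nextnonblank (t : List String) (idx : Int) (no : Int) : String :=
  if 0 < no then nextnonblank t (nnbSkip t (idx + 1)) (no - 1)
  else if (t.length : Int) ≤ idx then "" else (PySem.List.pyGet? t idx).getD ""
termination_by no.toNat
decreasing_by omega

-- inner while of nextnonblank on a STRING (A calls nextnonblank(t, i) with t a token):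
-- a one-character string c strips to "" iff c is one of " \r\n\t"
def nnbSkipChar (t : List Char) (idx : Int) : Int :=
  if h : idx < (t.length : Int) ∧ ((PySem.List.pyGet? t idx).getD ' ') ∈ [' ', '\r', '\n', '\t'] then
    nnbSkipChar t (idx + 1)
  else idx
termination_by ((t.length : Int) - idx).toNat
decreasing_by omega

-- nextnonblank(t, idx, no) with t a STRING (element = one-character string)
def nextnonblankChar (t : List Char) (idx : Int) (no : Int) : String :=
  if 0 < no then nextnonblankChar t (nnbSkipChar t (idx + 1)) (no - 1)
  else if (t.length : Int) ≤ idx then "" else String.ofList [(PySem.List.pyGet? t idx).getD ' ']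
termination_by no.toNat
decreasing_by omega

def is_h64op_with_righthand (v : String) : Bool :=
  if v ∈ ["and", "or", "not", "+", "-", "*", "/", ">", "<", "->", ".", "!=", "=", "=="] then true
  else PySem.Str.len v == 2 && ((v.toList[1]?).getD ' ' == '=')

def is_h64op_with_lefthand (v : String) : Bool :=
  if v ∈ ["and", "or", "+", "-", "*", "/", ">", "<", "->", ".", "!=", "=", "==", ":"] then true
  else PySem.Str.len v == 2 && ((v.toList[1]?).getD ' ' == '=')

def mustContinueA : List String :=
  ["->", "(", "[", ":", "later", ",", "else", "as", "in", "from", "rescue", "finally", "elseif"]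

-- the update of last_nonwhitespace_token from _future_last_token at the top of the loop body
def lastEff (last : String) (future : Option String) : String :=
  match future with
  | none => last
  | some f => if PySem.Str.stripChars f " \t\r\n" == "" then last else f

-- the two bracket-nesting updates of the loop body, in order
def nest2A (n : Int) (t : String) : Int :=
  if t ∈ [")", "]", "}"] then (if t ∈ ["(", "[", "{"] then n + 1 else n) - 1
  else (if t ∈ ["(", "[", "{"] then n + 1 else n)

-- z-loop of the string-continuation check: skip tokens with s[z].strip(" \t\r\n") == ""
def zSkip (t : List String) (idx : Int) : Int :=
  if h : idx < (t.length : Int) ∧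
      PySem.Str.stripChars ((PySem.List.pyGet? t idx).getD "") " \t\r\n" == "" then
    zSkip t (idx + 1)
  else idx
termination_by ((t.length : Int) - idx).toNat
decreasing_by omega

-- the is_string_continuation computation (z starts at token_count = i+1)
def contA (s : List String) (i : Nat) (last1 : String) : Bool :=
  if PySem.Str.endswith last1 "\"" || PySem.Str.endswith last1 "'" then
    decide (zSkip s ((i : Int) + 1) < (s.length : Int)) &&
      (PySem.Str.endswith ((PySem.List.pyGet? s (zSkip s ((i : Int) + 1))).getD "") "\"" ||
       PySem.Str.endswith ((PySem.List.pyGet? s (zSkip s ((i : Int) + 1))).getD "") "'")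
  else false

-- the for-loop of get_next_statement; `future` is _future_last_token, token_count = i+1
def loopA (s : List String) (last : String) (future : Option String) (nesting : Int) (i : Nat) :
    List String :=
  if h : i < s.length then
    if is_whitespace_token s[i] &&
        decide (nextnonblankChar s[i].toList (i : Int) 1 ∈ mustContinueA) then
      loopA s (lastEff last future) (some s[i]) (nest2A nesting s[i]) (i + 1)
    else if nest2A nesting s[i] == 0 && s[i] == "}" &&
        (!(decide (nextnonblank s (i : Int) 1 ∈ mustContinueA)) &&
         !(is_h64op_with_lefthand (nextnonblank s (i : Int) 1)) &&
         !(decide (nextnonblank s (i : Int) 1 ∈ ["(", "{", "["]))) then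
      s.take (i + 1)
    else if nest2A nesting s[i] == 0 && lastEff last future != "" &&
        decide (s[i] ∈ ["var", "const", "while", "do", "for", "type"]) then
      s.take i
    else if nest2A nesting s[i] == 0 &&
        (PySem.Str.endswith s[i] "\n" || PySem.Str.endswith s[i] "\r") &&
        lastEff last future != "," &&
        !(is_h64op_with_righthand (lastEff last future)) &&
        !(decide (lastEff last future ∈ ["in", "as"])) &&
        !(is_h64op_with_lefthand (nextnonblank s (i : Int) 1)) &&
        !(decide (nextnonblank s (i : Int) 1 ∈ mustContinueA)) then
      if contA s i (lastEff last future) then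
        -- fall through to the assert, then next iteration
        if nest2A nesting s[i] < 0 then []
        else loopA s (lastEff last future) (some s[i]) (nest2A nesting s[i]) (i + 1)
      else s.take (i + 1)
    else if nest2A nesting s[i] < 0 then
      [] -- assert(bracket_nesting >= 0) fails: AssertionError (excluded by Pre_)
    else loopA s (lastEff last future) (some s[i]) (nest2A nesting s[i]) (i + 1)
  else s
termination_by s.length - i

def get_next_statement (s : List String) : List String :=
  if s.length = 0 then [] else loopA s "" none 0 0

-- ===== PORT B =====
def altRighthand (v : String) : Bool :=
  if v ∈ ["and", "or", "not", "+", "-", "*", "/", ">", "<", "->", ".", "!=", "=", "=="] then true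
  else PySem.Str.len v == 2 && ((v.toList[1]?).getD ' ' == '=')

def altLefthand (v : String) : Bool :=
  if v ∈ ["and", "or", "+", "-", "*", "/", ">", "<", "->", ".", "!=", "=", "==", ":"] then true
  else PySem.Str.len v == 2 && ((v.toList[1]?).getD ' ' == '=')

def altMustContinue : List String :=
  ["->", "(", "[", ":", "later", ",", "else", "as", "in", "from", "rescue", "finally", "elseif"]

-- Source B's if/elif bracket update
def nestStep (n : Int) (t : String) : Int :=
  if t ∈ ["(", "[", "{"] then n + 1 else if t ∈ [")", "]", "}"] then n - 1 else n

-- one reverse pass: for each position, the first non-blank token to its right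
-- ((buildNxt l).1 = the nxt array of l, (buildNxt l).2 = the running `follow`)
def buildNxt : List String → List String × String
  | [] => ([], "")
  | t :: rest =>
    let p := buildNxt rest
    (p.2 :: p.1, if PySem.Str.stripChars t " \t\r\n" == "" then p.2 else t)

-- the single forward pass of B; lastNb = last non-blank token seen so far
def loopB (s nxt : List String) (lastNb : String) (nesting : Int) (i : Nat) : List String :=
  if h : i < s.length then
    if nestStep nesting s[i] == 0 && s[i] == "}" &&
        (!(decide (nxt.getD i "" ∈ altMustContinue)) && !(altLefthand (nxt.getD i "")) &&
         !(decide (nxt.getD i "" ∈ ["(", "{", "["]))) then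
      s.take (i + 1)
    else if nestStep nesting s[i] == 0 && lastNb != "" &&
        decide (s[i] ∈ ["var", "const", "while", "do", "for", "type"]) then
      s.take i
    else if nestStep nesting s[i] == 0 &&
        (PySem.Str.endswith s[i] "\n" || PySem.Str.endswith s[i] "\r") &&
        lastNb != "," && !(altRighthand lastNb) && !(decide (lastNb ∈ ["in", "as"])) &&
        !(altLefthand (nxt.getD i "")) && !(decide (nxt.getD i "" ∈ altMustContinue)) &&
        !((PySem.Str.endswith lastNb "\"" || PySem.Str.endswith lastNb "'") &&
          (PySem.Str.endswith (nxt.getD i "") "\"" || PySem.Str.endswith (nxt.getD i "") "'")) then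
      s.take (i + 1)
    else
      loopB s nxt (if PySem.Str.stripChars s[i] " \t\r\n" == "" then lastNb else s[i])
        (nestStep nesting s[i]) (i + 1)
  else s
termination_by s.length - i

def get_next_statement_alt (s : List String) : List String :=
  if s.length = 0 then [] else loopB s (buildNxt s).1 "" 0 0

-- ===== PRECONDITION & SPEC =====
def nestCount (l : List String) : Int := l.foldl nestStep 0

-- Pre_ excludes lists in which some prefix drives the bracket nesting negative: reaching such
-- a closing token makes A's assert fail (AssertionError).  On some of those lists A still
-- returns (a statement ends before the bad token); B returns the identical value there, so
-- the exclusion is conservative (see claim.json "cites").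
def Pre_get_next_statement (s : List String) : Prop :=
  ∀ k, k ≤ s.length → 0 ≤ nestCount (s.take k)
instance (s : List String) : Decidable (Pre_get_next_statement s) := by
  unfold Pre_get_next_statement; infer_instance

def pvWitness_get_next_statement : List String := ["x", "=", "1\n", "var"]

def Spec_get_next_statement (s : List String) (out : List String) : Prop :=
  out = get_next_statement_alt s
instance (s : List String) (out : List String) : Decidable (Spec_get_next_statement s out) := by
  unfold Spec_get_next_statement; infer_instance

-- ===== CLAIM (what is proved, stated in full; the proofs are below) =====
def Claim_equal_get_next_statement : Prop :=
  ∀ (s : List String), Dom_get_next_statement s → Pre_get_next_statement s →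
    Spec_get_next_statement s (get_next_statement s)

-- ===== LEMMAS AND PROOFS =====

def pvWS (c : Char) : Bool := c == ' ' || c == '\t' || c == '\n' || c == '\r'

lemma pvWS_iff_mem (c : Char) : pvWS c = true ↔ c ∈ [' ', '\t', '\n', '\r'] := by
  simp [pvWS]
  tauto

lemma pv_stripChars_nil_iff (x cs : List Char) :
    PySem.Chars.stripChars x cs = [] ↔ ∀ c ∈ x, cs.contains c := by
  unfold PySem.Chars.stripChars
  constructor
  · intro h c hc
    rw [List.reverse_eq_nil_iff, List.dropWhile_eq_nil_iff] at h
    rcases List.mem_append.1 (by rw [List.takeWhile_append_dropWhile]; exact hc :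
        c ∈ x.takeWhile (fun c => cs.contains c) ++ x.dropWhile (fun c => cs.contains c)) with hm | hm
    · exact List.mem_takeWhile_imp hm
    · exact h c (List.mem_reverse.2 hm)
  · intro h
    have hd : x.dropWhile (fun c => cs.contains c) = [] :=
      List.dropWhile_eq_nil_iff.mpr (fun a ha => h a ha)
    show (List.dropWhile (fun c => cs.contains c)
        ((List.dropWhile (fun c => cs.contains c) x).reverse)).reverse = ([] : List Char)
    rw [hd]
    rfl

lemma pv_blank_eq (x : String) (cs : String)
    (hcs : [' ', '\t', '\n', '\r'] ⊆ cs.toList)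
    (hcs2 : cs.toList ⊆ [' ', '\t', '\n', '\r']) :
    (PySem.Str.stripChars x cs == "") = x.toList.all pvWS := by
  rw [Bool.eq_iff_iff, beq_iff_eq, ← String.toList_eq_nil_iff, PySem.Str.toList_stripChars,
    pv_stripChars_nil_iff, List.all_eq_true]
  constructor
  · intro h c hc
    exact (pvWS_iff_mem c).2 (hcs2 (by simpa using h c hc))
  · intro h c hc
    simpa using hcs ((pvWS_iff_mem c).1 (h c hc))

lemma blank1 (x : String) : (PySem.Str.stripChars x " \t\r\n" == "") = x.toList.all pvWS :=
  pv_blank_eq x _ (by decide) (by decide)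

lemma blank2 (x : String) : (PySem.Str.stripChars x " \r\n\t" == "") = x.toList.all pvWS :=
  pv_blank_eq x _ (by decide) (by decide)

-- the first non-blank token of a list, "" if none
def firstNB : List String → String
  | [] => ""
  | t :: r => if t.toList.all pvWS then firstNB r else t

lemma buildNxt_snd (l : List String) : (buildNxt l).2 = firstNB l := by
  induction l with
  | nil => rfl
  | cons t r ih => simp [buildNxt, firstNB, blank1, ih]

lemma buildNxt_getD (l : List String) (i : Nat) :
    (buildNxt l).1.getD i "" = firstNB (l.drop (i + 1)) := by
  induction l generalizing i with
  | nil => cases i <;> rfl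
  | cons t r ih =>
    cases i with
    | zero => simpa [buildNxt] using buildNxt_snd r
    | succ n => simpa [buildNxt] using ih n


lemma nnbSkip_val (s : List String) (j : Nat) :
    (if (s.length : Int) ≤ nnbSkip s (j : Int) then ""
     else (PySem.List.pyGet? s (nnbSkip s (j : Int))).getD "") = firstNB (s.drop j) := by
  by_cases hj : j < s.length
  · have hget : PySem.List.pyGet? s (j : Int) = some s[j] := by simp [hj]
    have hdrop : s.drop j = s[j] :: s.drop (j + 1) := List.drop_eq_getElem_cons hj
    by_cases hb : s[j].toList.all pvWS
    · have hstep : nnbSkip s (j : Int) = nnbSkip s (((j + 1 : Nat) : Nat) : Int) := by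
        rw [nnbSkip, dif_pos ⟨by exact_mod_cast hj, by rw [hget]; show (PySem.Str.stripChars s[j] " \r\n\t" == "") = true; rw [blank2]; exact hb⟩]
        norm_num
      rw [hstep, nnbSkip_val s (j + 1), hdrop]
      simp [firstNB, hb]
    · have hstop : nnbSkip s (j : Int) = (j : Int) := by
        rw [nnbSkip, dif_neg]
        rintro ⟨h1, h2⟩
        rw [hget] at h2
        rw [show ((some s[j]).getD "") = s[j] from rfl, blank2] at h2
        exact hb h2
      rw [hstop, if_neg (by exact_mod_cast Nat.not_le.mpr hj), hget, hdrop]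
      simp [firstNB, hb]
  · have hstop : nnbSkip s (j : Int) = (j : Int) := by
      rw [nnbSkip, dif_neg]
      rintro ⟨h1, h2⟩
      omega
    rw [hstop, if_pos (by exact_mod_cast Nat.le_of_not_lt hj),
      List.drop_eq_nil_of_le (Nat.le_of_not_lt hj)]
    rfl
termination_by s.length - j
decreasing_by omega

lemma zSkip_eq (s : List String) (idx : Int) : zSkip s idx = nnbSkip s idx := by
  rw [zSkip, nnbSkip]
  by_cases h : idx < (s.length : Int) ∧ ((PySem.List.pyGet? s idx).getD "").toList.all pvWS
  · rw [dif_pos ⟨h.1, by rw [blank1]; exact h.2⟩, dif_pos ⟨h.1, by rw [blank2]; exact h.2⟩,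
      zSkip_eq]
  · rw [dif_neg, dif_neg]
    · rintro ⟨h1, h2⟩
      rw [blank2] at h2
      exact h ⟨h1, h2⟩
    · rintro ⟨h1, h2⟩
      rw [blank1] at h2
      exact h ⟨h1, h2⟩
termination_by ((s.length : Int) - idx).toNat
decreasing_by omega

lemma nextnonblank_eq (s : List String) (i : Nat) :
    nextnonblank s (i : Int) 1 = firstNB (s.drop (i + 1)) := by
  rw [nextnonblank, if_pos (by norm_num), nextnonblank, if_neg (by norm_num)]
  rw [show (i : Int) + 1 = ((i + 1 : Nat) : Int) by push_cast; ring]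
  exact nnbSkip_val s (i + 1)

lemma nnbSkipChar_ge (l : List Char) (hws : ∀ c ∈ l, c ∈ [' ', '\r', '\n', '\t']) (j : Int)
    (hj : 0 ≤ j) : (l.length : Int) ≤ nnbSkipChar l j := by
  rw [nnbSkipChar]
  by_cases h : j < (l.length : Int)
  · have hjn : j.toNat < l.length := by omega
    have hget : PySem.List.pyGet? l j = some l[j.toNat] := by
      have h2 := PySem.List.pyGet?_natCast l j.toNat
      rw [show ((j.toNat : Nat) : Int) = j by omega] at h2
      rw [h2, List.getElem?_eq_getElem hjn]
    rw [dif_pos ⟨h, by rw [hget]; exact hws _ (List.getElem_mem hjn)⟩]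
    exact nnbSkipChar_ge l hws (j + 1) (by omega)
  · rw [dif_neg (fun hc => h hc.1)]
    omega
termination_by ((l.length : Int) - j).toNat
decreasing_by omega

lemma nextnonblankChar_ws (t : String) (hws : is_whitespace_token t = true) (i : Nat) :
    nextnonblankChar t.toList (i : Int) 1 = "" := by
  have hall : ∀ c ∈ t.toList, c ∈ [' ', '\r', '\n', '\t'] := by
    intro c hc
    unfold is_whitespace_token at hws
    split at hws
    · simp at hws
    · have := List.all_eq_true.1 hws c hc
      simp at this ⊢
      tauto
  rw [nextnonblankChar, if_pos (by norm_num), nextnonblankChar, if_neg (by norm_num),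
    if_pos (nnbSkipChar_ge t.toList hall ((i : Int) + 1) (by omega))]

lemma nest_eq (n : Int) (t : String) : nest2A n t = nestStep n t := by
  unfold nest2A nestStep
  by_cases h1 : t ∈ ["(", "[", "{"]
  · have h2 : t ∉ [")", "]", "}"] := by
      simp only [List.mem_cons, List.not_mem_nil] at h1 ⊢
      rcases h1 with rfl | rfl | rfl | h
      · simp
      · simp
      · simp
      · simp at h
    simp [h1, h2]
  · simp [h1]

lemma nestCount_take_succ (s : List String) (i : Nat) (h : i < s.length) :
    nestCount (s.take (i + 1)) = nestStep (nestCount (s.take i)) s[i] := by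
  unfold nestCount
  rw [List.take_add_one, List.foldl_append]
  simp [h]


lemma ends_empty (q : String) (hq : q ≠ "") : PySem.Str.endswith "" q = false := by
  rw [Bool.eq_false_iff]
  intro hc
  have h2 : q.toList <:+ ("" : String).toList :=
    (PySem.Chars.endswith_iff _ _).1 (by simpa using hc)
  simp at h2
  exact hq h2

lemma cont_eq (s : List String) (i : Nat) (lb : String) :
    contA s i lb = ((PySem.Str.endswith lb "\"" || PySem.Str.endswith lb "'") &&
      (PySem.Str.endswith (firstNB (s.drop (i + 1))) "\"" ||
       PySem.Str.endswith (firstNB (s.drop (i + 1))) "'")) := by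
  unfold contA
  by_cases hq : (PySem.Str.endswith lb "\"" || PySem.Str.endswith lb "'") = true
  · rw [if_pos hq, hq, Bool.true_and, zSkip_eq,
      show (i : Int) + 1 = ((i + 1 : Nat) : Int) by push_cast; ring]
    have hv := nnbSkip_val s (i + 1)
    by_cases hz : (s.length : Int) ≤ nnbSkip s ((i + 1 : Nat) : Int)
    · rw [if_pos hz] at hv
      rw [← hv, decide_eq_false (not_lt.mpr hz), Bool.false_and,
        ends_empty _ (by decide), ends_empty _ (by decide)]
      simp
    · rw [if_neg hz] at hv
      rw [hv, decide_eq_true (lt_of_not_ge hz), Bool.true_and]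
  · rw [if_neg hq]
    rw [Bool.not_eq_true] at hq
    rw [hq, Bool.false_and]

lemma ops_left : altLefthand = is_h64op_with_lefthand := rfl
lemma ops_right : altRighthand = is_h64op_with_righthand := rfl
lemma mc_eq : altMustContinue = mustContinueA := rfl

lemma if_shape {α : Type} (c2 c3 c4 q : Bool) (t1 t2 r : α) :
    (if c2 then t1 else if c3 then t2 else if c4 then (if q then r else t1) else r)
    = (if c2 then t1 else if c3 then t2 else if c4 && !q then t1 else r) := by
  cases c2 <;> cases c3 <;> cases c4 <;> cases q <;> simp

set_option maxHeartbeats 2000000 in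
lemma loop_eq (s : List String) (hpre : ∀ k, k ≤ s.length → 0 ≤ nestCount (s.take k))
    (i : Nat) (last lb : String) (future : Option String) (nesting : Int)
    (hlast : lastEff last future = lb) (hnest : nesting = nestCount (s.take i)) :
    loopA s last future nesting i = loopB s (buildNxt s).1 lb nesting i := by
  rw [loopA, loopB]
  by_cases h : i < s.length
  swap
  · rw [dif_neg h, dif_neg h]
  rw [dif_pos h, dif_pos h]
  have hnn : 0 ≤ nestStep nesting s[i] := by
    rw [hnest, ← nestCount_take_succ s i h]
    exact hpre (i + 1) (by omega)
  have hdead : (is_whitespace_token s[i] &&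
      decide (nextnonblankChar s[i].toList (i : Int) 1 ∈ mustContinueA)) = false := by
    by_cases hw : is_whitespace_token s[i] = true
    · rw [hw, nextnonblankChar_ws _ hw, Bool.true_and]
      decide
    · rw [Bool.not_eq_true] at hw
      rw [hw, Bool.false_and]
  have hrec : loopA s lb (some s[i]) (nestStep nesting s[i]) (i + 1) =
      loopB s (buildNxt s).1
        (if PySem.Str.stripChars s[i] " \t\r\n" == "" then lb else s[i])
        (nestStep nesting s[i]) (i + 1) :=
    loop_eq s hpre (i + 1) lb _ (some s[i]) _ rfl
      (by rw [hnest]; exact (nestCount_take_succ s i h).symm)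
  rw [hdead, if_neg Bool.false_ne_true, nest_eq, hlast, nextnonblank_eq, cont_eq,
    ← buildNxt_getD, ops_left, ops_right, mc_eq]
  simp only [if_neg (not_lt.mpr hnn)]
  rw [hrec]
  exact if_shape _ _ _ _ _ _ _
termination_by s.length - i
decreasing_by omega

theorem get_next_statement_spec : Claim_equal_get_next_statement := by
  intro s _hdom hpre
  unfold Spec_get_next_statement get_next_statement get_next_statement_alt
  by_cases hs : s.length = 0
  · rw [if_pos hs, if_pos hs]
  · rw [if_neg hs, if_neg hs]
    exact loop_eq s hpre 0 "" "" none 0 rfl rfl
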